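-- pv_equiv track=rewrite | github.com/JackDanielHarding/advent-of-code-2021 | Callum/Day12/Day12.py | oneSmallCaveTwiceOnlyCheck
-- ===== SOURCE A (Python) =====
-- from collections import Counter
--
-- def oneSmallCaveTwiceOnlyCheck(nextNode : str, visited : list[str]):
--     if nextNode.isupper():
--         return True
--     else:
--         smallCavesVisited = [node for node in visited if node.islower()]
--         if nextNode not in smallCavesVisited:
--             return True
--         else:
--             countedSmallCaves = Counter(smallCavesVisited).most_common()
--             return len(countedSmallCaves) == 0 or countedSmallCaves[0][1] <= 1
-- ===== SOURCE B (Python) =====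
-- def oneSmallCaveTwiceOnlyCheck(nextNode: str, visited: list[str]):
--     if nextNode.isupper():
--         return True
--     seen = set()
--     dup = False
--     for node in visited:
--         if node.islower():
--             if node in seen:
--                 dup = True
--             seen.add(node)
--     return nextNode not in seen or not dup
-- ===== Notes on version B (the rewrite author's own statement) =====
-- stated objective: simpler
-- what changed: Replaces the filter-then-Counter-then-most_common pipeline with a single early-state pass over visited maintaining a seen-set and a duplicate flag; no counting, no sorting.
import Mathlib
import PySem

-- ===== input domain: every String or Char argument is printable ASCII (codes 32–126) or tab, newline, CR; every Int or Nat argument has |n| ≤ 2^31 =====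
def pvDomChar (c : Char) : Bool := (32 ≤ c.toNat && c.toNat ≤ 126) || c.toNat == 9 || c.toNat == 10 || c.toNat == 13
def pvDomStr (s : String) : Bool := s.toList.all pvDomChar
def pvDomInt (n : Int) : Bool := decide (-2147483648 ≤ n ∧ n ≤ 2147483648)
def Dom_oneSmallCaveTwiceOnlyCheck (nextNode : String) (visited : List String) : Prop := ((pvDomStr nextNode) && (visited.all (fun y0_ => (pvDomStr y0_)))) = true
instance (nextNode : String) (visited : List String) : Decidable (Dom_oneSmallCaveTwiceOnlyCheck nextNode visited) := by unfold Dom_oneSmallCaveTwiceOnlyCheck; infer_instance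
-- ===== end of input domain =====

-- B replaces A's filter + Counter + most_common pipeline by one fold over `visited`
-- maintaining a seen-set and a duplicate flag (objective: simpler, no counting/sorting).

-- str.isupper()/str.islower(): at least one cased character and no cased character of the
-- opposite case; exact on the ASCII domain (cased = letters), hand-ported (no PySem string form).
def pvStrIsupper (s : String) : Bool :=
  s.toList.any PySem.Chars.isupper && !s.toList.any PySem.Chars.islower
def pvStrIslower (s : String) : Bool :=
  s.toList.any PySem.Chars.islower && !s.toList.any PySem.Chars.isupper

-- ===== PORT A =====
def oneSmallCaveTwiceOnlyCheck (nextNode : String) (visited : List String) : Bool :=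
  if pvStrIsupper nextNode then true
  else
    let smallCavesVisited := visited.filter (fun node => pvStrIslower node)
    if !(smallCavesVisited.contains nextNode) then true
    else
      -- Counter(...).most_common() = items sorted by count, reverse=True (stable)
      let countedSmallCaves :=
        PySem.List.sorted (PySem.Dict.counter smallCavesVisited).items (fun p => p.2) true
      countedSmallCaves.length == 0 ||
        (match countedSmallCaves with
         | [] => true            -- unreachable: guarded by the `or` short-circuit in Python
         | p :: _ => decide (p.2 ≤ 1))

-- ===== PORT B =====
def oneSmallCaveTwiceOnlyCheck_alt (nextNode : String) (visited : List String) : Bool :=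
  if pvStrIsupper nextNode then true
  else
    let st := visited.foldl
      (fun (st : PySem.Set String × Bool) node =>
        if pvStrIslower node then (st.1.add node, st.2 || st.1.contains node) else st)
      (PySem.Set.ofList [], false)
    !(st.1.contains nextNode) || !st.2

-- ===== PRECONDITION & SPEC =====
def Spec_oneSmallCaveTwiceOnlyCheck (nextNode : String) (visited : List String) (out : Bool) : Prop := out = oneSmallCaveTwiceOnlyCheck_alt nextNode visited
instance (nextNode : String) (visited : List String) (out : Bool) : Decidable (Spec_oneSmallCaveTwiceOnlyCheck nextNode visited out) := by unfold Spec_oneSmallCaveTwiceOnlyCheck; infer_instance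

-- ===== CLAIM (what is proved, stated in full; the proofs are below) =====
def Claim_equal_oneSmallCaveTwiceOnlyCheck : Prop := ∀ (nextNode : String) (visited : List String), Dom_oneSmallCaveTwiceOnlyCheck nextNode visited → Spec_oneSmallCaveTwiceOnlyCheck nextNode visited (oneSmallCaveTwiceOnlyCheck nextNode visited)

-- ===== LEMMAS AND PROOFS =====

theorem pvOfList_append_singleton (acc : List String) (x : String) :
    PySem.Set.ofList (acc ++ [x]) = (PySem.Set.ofList acc).add x := by
  simp [PySem.Set.ofList, List.foldl_append]

theorem pvContains_ofList (acc : List String) (x : String) :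
    (PySem.Set.ofList acc).contains x = decide (x ∈ acc) := by
  simp [PySem.Set.mem_ofList]

theorem pvLoop (visited acc : List String) :
    visited.foldl
      (fun (st : PySem.Set String × Bool) node =>
        if pvStrIslower node then (st.1.add node, st.2 || st.1.contains node) else st)
      (PySem.Set.ofList acc, !acc.Nodup)
    = (PySem.Set.ofList (acc ++ visited.filter (fun n => pvStrIslower n)),
       !(acc ++ visited.filter (fun n => pvStrIslower n)).Nodup) := by
  induction visited generalizing acc with
  | nil => simp
  | cons node rest ih =>
    by_cases h : pvStrIslower node = true
    · have hcat : (acc ++ [node]).Nodup ↔ acc.Nodup ∧ node ∉ acc := by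
        constructor
        · intro hnd
          rcases List.nodup_append.1 hnd with ⟨h1, _, h3⟩
          exact ⟨h1, fun hm => h3 node hm node (by simp) rfl⟩
        · intro ⟨h1, h2⟩
          refine List.nodup_append.2 ⟨h1, List.nodup_singleton node, ?_⟩
          intro a ha b hb heq
          simp at hb
          exact h2 (hb ▸ heq ▸ ha)
      have hst : ((PySem.Set.ofList acc).add node,
          (!acc.Nodup) || (PySem.Set.ofList acc).contains node)
          = (PySem.Set.ofList (acc ++ [node]), !(acc ++ [node]).Nodup) := by
        rw [pvOfList_append_singleton, pvContains_ofList]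
        by_cases hm : node ∈ acc <;> by_cases hn : acc.Nodup <;>
          simp [hm, hn, hcat]
      simp only [List.foldl_cons]
      rw [if_pos h, hst, ih (acc ++ [node])]
      simp [h]
    · simp only [List.foldl_cons]
      rw [if_neg h, ih acc]
      simp [h]

theorem pvMaxCount_iff_nodup (small : List String) (p : String × Int) (t : List (String × Int))
    (hs : PySem.List.sorted (PySem.Dict.counter small).items (fun p => p.2) true = p :: t) :
    (p.2 ≤ 1 ↔ small.Nodup) := by
  have hmem : p ∈ (PySem.Dict.counter small).items := by
    have : p ∈ PySem.List.sorted (PySem.Dict.counter small).items (fun p => p.2) true := by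
      rw [hs]; exact List.mem_cons_self
    exact (PySem.List.mem_sorted _ _ _ _).1 this
  rw [PySem.Dict.items_counter] at hmem
  obtain ⟨k, hk, hpk⟩ := List.mem_map.1 hmem
  have hk' : k ∈ small := (PySem.Set.mem_ofList small k).1 hk
  constructor
  · intro hle
    rw [List.nodup_iff_count_le_one]
    intro a
    by_cases ha : a ∈ small
    · have hai : (a, (small.count a : Int)) ∈ (PySem.Dict.counter small).items := by
        rw [PySem.Dict.items_counter]
        exact List.mem_map.2 ⟨a, (PySem.Set.mem_ofList small a).2 ha, rfl⟩
      have := PySem.List.key_head_sorted_rev_ge (PySem.Dict.counter small).items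
        (fun p => p.2) hs _ hai
      simp only at this
      omega
    · simp [List.count_eq_zero_of_not_mem ha]
  · intro hnd
    have := (List.nodup_iff_count_le_one.1 hnd) k
    have : p.2 = (small.count k : Int) := by rw [← hpk]
    omega

theorem oneSmallCaveTwiceOnlyCheck_eq (nextNode : String) (visited : List String) :
    oneSmallCaveTwiceOnlyCheck nextNode visited = oneSmallCaveTwiceOnlyCheck_alt nextNode visited := by
  unfold oneSmallCaveTwiceOnlyCheck oneSmallCaveTwiceOnlyCheck_alt
  by_cases hu : pvStrIsupper nextNode = true
  · simp [hu]
  · simp only [hu, Bool.false_eq_true, if_false]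
    have hinit : (PySem.Set.ofList ([] : List String), false)
        = (PySem.Set.ofList ([] : List String), !([] : List String).Nodup) := by simp
    rw [hinit, pvLoop visited []]
    simp only [List.nil_append]
    set small := visited.filter (fun n => pvStrIslower n) with hsm
    rw [pvContains_ofList]
    by_cases hmem : nextNode ∈ small
    · have hc : small.contains nextNode = true := by simp [hmem]
      simp only [hc, hmem, decide_true, Bool.not_true, Bool.false_or, Bool.not_not]
      have hne : small ≠ [] := by intro h; rw [h] at hmem; exact absurd hmem (by simp)
      obtain ⟨p, t, hs⟩ : ∃ p t,
          PySem.List.sorted (PySem.Dict.counter small).items (fun p => p.2) true = p :: t := by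
        rcases hh : PySem.List.sorted (PySem.Dict.counter small).items (fun p => p.2) true with _ | ⟨p, t⟩
        · exfalso
          have := (PySem.List.sorted_eq_nil_iff (PySem.Dict.counter small).items (fun p => p.2) true).1 hh
          rw [PySem.Dict.items_counter] at this
          have : PySem.Set.ofList small = ([] : List String) := by
            exact List.map_eq_nil_iff.1 this
          have h2 := (PySem.Set.mem_ofList small nextNode).2 hmem
          rw [this] at h2; exact absurd h2 (by simp)
        · exact ⟨p, t, rfl⟩
      rw [hs]
      have hlen : ((p :: t).length == 0) = false := by simp
      rw [hlen]
      simp only [Bool.false_or]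
      have hiff := pvMaxCount_iff_nodup small p t hs
      by_cases hnd : small.Nodup
      · simp [hnd, hiff.2 hnd]
      · have : ¬ p.2 ≤ 1 := fun h => hnd (hiff.1 h)
        simp [hnd, this]
    · simp [hmem]

-- ===== VERDICT (by name: the statement is the Claim_ definition above) =====
theorem oneSmallCaveTwiceOnlyCheck_spec : Claim_equal_oneSmallCaveTwiceOnlyCheck := by
  intro nextNode visited _
  exact oneSmallCaveTwiceOnlyCheck_eq nextNode visited
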